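-- pv_equiv track=rewrite | github.com/danielbkantor/AIWork | Final Project/webCrawler.py | getMaxFreq
-- ===== SOURCE A (Python) =====
-- def getMaxFreq(invertedIndex):
--     maxFreq = dict()
--     for i in invertedIndex.values(): #go through all the values in the inverted index
--         for j in i: #iterate through all the lists associated with a given word
--             if j[0] not in maxFreq: #if the doc doesn't have a max frequency yet, set it to the frequency of the word you are at
--                 maxFreq[j[0]] = j[1]
--             elif maxFreq[j[0]] < j[1]: #if the doc does have a max frequency, if the one currently set it lower than change it to the higher value
--                 maxFreq[j[0]] = j[1]
--
--     return maxFreq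
-- ===== SOURCE B (Python) =====
-- def getMaxFreq(invertedIndex):
--     pairs = [j for i in invertedIndex.values() for j in i]
--     grouped = {}
--     for doc, freq in pairs:
--         grouped.setdefault(doc, []).append(freq)
--     return {doc: max(freqs) for doc, freqs in grouped.items()}
-- ===== Notes on version B (the rewrite author's own statement) =====
-- stated objective: alternative
-- what changed: Instead of keeping a running maximum per document while scanning, B flattens all postings into one pair list, groups the full frequency list of each document in a dict of lists, and reduces each group with max() in a second pass.
import Mathlib
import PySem

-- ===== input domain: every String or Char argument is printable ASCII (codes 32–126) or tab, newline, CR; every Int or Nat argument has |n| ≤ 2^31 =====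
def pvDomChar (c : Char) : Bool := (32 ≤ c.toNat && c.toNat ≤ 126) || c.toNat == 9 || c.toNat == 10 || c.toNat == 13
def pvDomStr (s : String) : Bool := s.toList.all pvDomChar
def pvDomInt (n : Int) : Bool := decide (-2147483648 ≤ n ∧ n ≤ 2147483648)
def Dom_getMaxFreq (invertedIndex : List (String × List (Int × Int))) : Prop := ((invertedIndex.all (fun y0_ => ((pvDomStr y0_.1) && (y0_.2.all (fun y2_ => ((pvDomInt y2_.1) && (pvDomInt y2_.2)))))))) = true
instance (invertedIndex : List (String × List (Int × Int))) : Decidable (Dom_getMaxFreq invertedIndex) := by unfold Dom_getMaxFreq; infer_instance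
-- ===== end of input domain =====

-- B groups all frequencies per document first and reduces with max afterwards; A keeps a running max.

-- ===== PORT A =====
-- body of A's inner loop: running-max update of the dict for one [doc, freq] pair
def getMaxFreqStep (d : PySem.Dict Int Int) (j : Int × Int) : PySem.Dict Int Int :=
  match d.get? j.1 with
  | none => d.insert j.1 j.2          -- j[0] not in maxFreq
  | some v => if v < j.2 then d.insert j.1 j.2 else d

def getMaxFreq (invertedIndex : List (String × List (Int × Int))) : List (Int × Int) :=
  ((invertedIndex.map (·.2)).foldl (fun d i => i.foldl getMaxFreqStep d) PySem.Dict.empty).items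

-- ===== PORT B =====
def getMaxFreq_alt (invertedIndex : List (String × List (Int × Int))) : List (Int × Int) :=
  let pairs := (invertedIndex.map (·.2)).flatMap (fun i => i)
  -- grouped.setdefault(doc, []).append(freq) == d[doc] = d.get(doc, []) + [freq] == Dict.modify doc [] (· ++ [freq])
  let grouped := pairs.foldl (fun d p => d.modify p.1 [] (· ++ [p.2])) PySem.Dict.empty
  -- every grouped list is nonempty, so max() never raises; getD 0 is never taken
  grouped.items.map (fun q => (q.1, (PySem.List.max? q.2 (fun y => y)).getD 0))

-- ===== PRECONDITION & SPEC =====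
def Spec_getMaxFreq (invertedIndex : List (String × List (Int × Int))) (out : List (Int × Int)) : Prop := out = getMaxFreq_alt invertedIndex
instance (invertedIndex : List (String × List (Int × Int))) (out : List (Int × Int)) : Decidable (Spec_getMaxFreq invertedIndex out) := by unfold Spec_getMaxFreq; infer_instance

-- ===== CLAIM (what is proved, stated in full; the proofs are below) =====
def Claim_equal_getMaxFreq : Prop := ∀ (invertedIndex : List (String × List (Int × Int))), Dom_getMaxFreq invertedIndex → Spec_getMaxFreq invertedIndex (getMaxFreq invertedIndex)

-- ===== LEMMAS AND PROOFS =====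

-- running max over an Option accumulator: exactly what one step of A does at the key it touches
def pvOmax (o : Option Int) (f : Int) : Option Int :=
  some (match o with | none => f | some v => if v < f then f else v)

theorem pv_foldl_flat {α β : Type} (l : List (List α)) (f : β → α → β) (init : β) :
    l.foldl (fun d i => i.foldl f d) init = (l.flatMap (fun i => i)).foldl f init := by
  induction l generalizing init with
  | nil => rfl
  | cons h t ih => simp [List.foldl_append, ih]

theorem pv_stepA_get?_self (d : PySem.Dict Int Int) (p : Int × Int) :
    (getMaxFreqStep d p).get? p.1 = pvOmax (d.get? p.1) p.2 := by
  unfold getMaxFreqStep pvOmax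
  cases h : d.get? p.1 with
  | none => simp [PySem.Dict.get?_insert_self]
  | some v =>
      by_cases hv : v < p.2 <;> simp [hv, PySem.Dict.get?_insert_self, h]

theorem pv_stepA_get?_ne (d : PySem.Dict Int Int) (p : Int × Int) (k : Int) (hk : k ≠ p.1) :
    (getMaxFreqStep d p).get? k = d.get? k := by
  unfold getMaxFreqStep
  cases h : d.get? p.1 with
  | none => simp [PySem.Dict.get?_insert, hk]
  | some v =>
      by_cases hv : v < p.2 <;> simp [hv, PySem.Dict.get?_insert, hk]

theorem pv_getA_get? (ps : List (Int × Int)) (d : PySem.Dict Int Int) (k : Int) :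
    (ps.foldl getMaxFreqStep d).get? k
      = ((ps.filter (fun p => p.1 == k)).map (·.2)).foldl pvOmax (d.get? k) := by
  induction ps generalizing d with
  | nil => rfl
  | cons p t ih =>
      by_cases hk : p.1 = k
      · subst hk
        simp [List.foldl_cons, ih, pv_stepA_get?_self]
      · have : k ≠ p.1 := fun h => hk h.symm
        simp [List.foldl_cons, ih, pv_stepA_get?_ne d p k this, hk]

theorem pv_stepA_keys (d : PySem.Dict Int Int) (p : Int × Int) :
    (getMaxFreqStep d p).keys = PySem.Set.add d.keys p.1 := by
  unfold getMaxFreqStep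
  cases h : d.get? p.1 with
  | none =>
      have hc : d.contains p.1 = false := by
        have := PySem.Dict.contains_eq_isSome_get? d p.1
        simp [h] at this; exact this
      have hm : p.1 ∉ d.keys := by
        simpa [PySem.Dict.contains_iff_mem_keys] using (by simp [hc] : ¬ d.contains p.1 = true)
      rw [PySem.Dict.keys_insert_of_not_contains _ _ hc]
      simp [PySem.Set.add, hm]
  | some v =>
      have hc : d.contains p.1 = true := by
        have := PySem.Dict.contains_eq_isSome_get? d p.1
        simp [h] at this; exact this
      have hm : p.1 ∈ d.keys := (PySem.Dict.contains_iff_mem_keys d p.1).1 hc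
      by_cases hv : v < p.2
      · simp [hv, PySem.Dict.keys_insert_of_contains _ _ hc, PySem.Set.add, hm]
      · simp [hv, PySem.Set.add, hm]

theorem pv_getA_keys (ps : List (Int × Int)) (d : PySem.Dict Int Int) :
    (ps.foldl getMaxFreqStep d).keys = PySem.Set.update d.keys (ps.map (·.1)) := by
  induction ps generalizing d with
  | nil => rfl
  | cons p t ih => simp [List.foldl_cons, ih, pv_stepA_keys, PySem.Set.update_cons]

theorem pv_foldl_pvOmax_some (fs : List Int) (a : Int) :
    fs.foldl pvOmax (some a) = some (fs.foldl max a) := by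
  induction fs generalizing a with
  | nil => rfl
  | cons f t ih =>
      have : pvOmax (some a) f = some (max a f) := by
        unfold pvOmax; by_cases h : a < f <;> simp [h] <;> omega
      simp [List.foldl_cons, this, ih]

-- ===== VERDICT (by name: the statement is the Claim_ definition above) =====
theorem getMaxFreq_spec : Claim_equal_getMaxFreq := by
  intro inv _
  unfold Spec_getMaxFreq getMaxFreq getMaxFreq_alt
  dsimp only
  rw [pv_foldl_flat]
  set ps := (inv.map (·.2)).flatMap (fun i => i) with hps
  set K := PySem.Set.ofList (ps.map (·.1)) with hK
  -- A side
  have hAkeys : (ps.foldl getMaxFreqStep PySem.Dict.empty).keys = K := by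
    rw [pv_getA_keys]
    simp [PySem.Dict.keys_empty, PySem.Set.update_nil_left, hK]
  have hAnodup : (ps.foldl getMaxFreqStep PySem.Dict.empty).keys.Nodup := by
    rw [hAkeys]; exact PySem.Set.nodup_ofList _
  -- B side
  have hBkeys : (ps.foldl (fun d p => d.modify p.1 [] (· ++ [p.2])) PySem.Dict.empty).keys = K := by
    rw [PySem.Dict.keys_foldl_modify_key]
    simp [PySem.Dict.keys_empty, PySem.Set.update_nil_left, hK]
  have hBnodup : (ps.foldl (fun d p => d.modify p.1 [] (· ++ [p.2])) PySem.Dict.empty).keys.Nodup := by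
    rw [hBkeys]; exact PySem.Set.nodup_ofList _
  rw [PySem.Dict.items_eq_map_keys _ hAnodup (0 : Int),
      PySem.Dict.items_eq_map_keys _ hBnodup ([] : List Int),
      hAkeys, hBkeys, List.map_map]
  apply List.map_congr_left
  intro k hkK
  have hkmem : k ∈ ps.map (·.1) := by
    have := (PySem.Set.mem_ofList (ps.map (·.1)) k).1 (by simpa [hK] using hkK)
    exact this
  obtain ⟨p, hp, hpk⟩ := List.mem_map.1 hkmem
  have hfil : p ∈ ps.filter (fun p => p.1 == k) := by
    refine List.mem_filter.2 ⟨hp, by simp [hpk]⟩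
  have hfreqs : ∃ f t, (ps.filter (fun p => p.1 == k)).map (·.2) = f :: t := by
    cases hc : (ps.filter (fun p => p.1 == k)).map (·.2) with
    | nil =>
        exfalso
        have : p.2 ∈ (ps.filter (fun p => p.1 == k)).map (·.2) := List.mem_map_of_mem hfil
        rw [hc] at this; simp at this
    | cons f t => exact ⟨f, t, rfl⟩
  obtain ⟨f, t, hft⟩ := hfreqs
  have hBgetD : (ps.foldl (fun d p => d.modify p.1 [] (· ++ [p.2])) PySem.Dict.empty).getD k []
      = (ps.filter (fun p => p.1 == k)).map (·.2) := by
    rw [PySem.Dict.getD_foldl_modify_append]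
    simp [PySem.Dict.getD_empty]
  have hAgetD : (ps.foldl getMaxFreqStep PySem.Dict.empty).getD k 0 = t.foldl max f := by
    rw [PySem.Dict.getD_eq_get?_getD, pv_getA_get?]
    simp only [PySem.Dict.get?_empty, hft, List.foldl_cons]
    have h1 : pvOmax none f = some f := rfl
    rw [h1, pv_foldl_pvOmax_some]
    rfl
  simp only [Function.comp, hBgetD, hft, hAgetD]
  rw [PySem.List.max?_id_cons]
  rfl
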